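-- pv_equiv track=rewrite | github.com/sankar906/resume-analyzer-backend | src/api/v1/prompts/eval_injection.py | _requirements_section_keys
-- ===== SOURCE A (Python) =====
-- from typing import Any
--
-- _REQ_SECTION_ORDER = (
--     "technical_skills",
--     "core_competencies",
--     "attitude_mindset",
-- )
--
-- def _requirements_section_keys(d: dict[str, Any], bl: set[str]) -> list[str]:
--     """Known sections first (in _REQ_SECTION_ORDER), then any other keys (sorted, stable)."""
--     out: list[str] = []
--     seen: set[str] = set()
--     for key in _REQ_SECTION_ORDER:
--         if key in bl or key not in d:
--             continue
--         out.append(key)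
--         seen.add(key)
--     rest = sorted(k for k in d if k not in seen and k not in bl)
--     return out + rest
-- ===== SOURCE B (Python) =====
-- _REQ_SECTION_ORDER = (
--     "technical_skills",
--     "core_competencies",
--     "attitude_mindset",
-- )
--
-- def _requirements_section_keys(d, bl):
--     prio = {name: i for i, name in enumerate(_REQ_SECTION_ORDER)}
--     sentinel = len(_REQ_SECTION_ORDER)
--     keys = [k for k in d if k not in bl]
--     return sorted(keys, key=lambda k: (prio.get(k, sentinel), k))
-- ===== Notes on version B (the rewrite author's own statement) =====
-- stated objective: idiomatic
-- what changed: Replaces A's two-phase build (an explicit loop over the section order maintaining a seen-set, followed by a second sorted pass over the leftovers) by a single sort of the non-blacklisted keys under a (priority, name) tuple key taken from an enumerate-built priority map.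
import Mathlib
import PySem

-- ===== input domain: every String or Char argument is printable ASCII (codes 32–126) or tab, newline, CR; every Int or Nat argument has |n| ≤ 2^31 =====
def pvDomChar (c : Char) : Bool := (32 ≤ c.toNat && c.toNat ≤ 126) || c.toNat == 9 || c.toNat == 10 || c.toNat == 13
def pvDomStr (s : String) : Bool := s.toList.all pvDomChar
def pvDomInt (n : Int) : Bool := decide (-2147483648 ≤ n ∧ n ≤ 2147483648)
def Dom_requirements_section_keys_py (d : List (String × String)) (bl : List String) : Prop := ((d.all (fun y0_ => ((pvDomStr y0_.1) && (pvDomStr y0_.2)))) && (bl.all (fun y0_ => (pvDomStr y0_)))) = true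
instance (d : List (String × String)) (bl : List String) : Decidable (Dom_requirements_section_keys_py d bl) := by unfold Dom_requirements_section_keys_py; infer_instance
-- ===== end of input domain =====

-- B replaces A's two-phase build (loop over the section order + seen-set, then a second sorted
-- pass over the leftovers) by a single sort of the non-blacklisted keys under a (priority, name)
-- key from an enumerate-built priority map — same result, more idiomatic.

-- _REQ_SECTION_ORDER (module constant shared by both versions)
def pvOrder : List String := ["technical_skills", "core_competencies", "attitude_mindset"]

-- ===== PORT A =====
def requirements_section_keys_py (d : List (String × String)) (bl : List String) : List String :=
  let ks := PySem.List.dedup (d.map Prod.fst)   -- the dict's keys, first occurrence order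
  let st := pvOrder.foldl (fun (acc : List String × PySem.Set String) key =>
      if bl.contains key || !ks.contains key then acc
      else (acc.1 ++ [key], PySem.Set.add acc.2 key)) ([], PySem.Set.empty)
  let rest := PySem.List.sorted (ks.filter (fun k => !(PySem.Set.contains st.2 k) && !bl.contains k)) (fun x => x)
  st.1 ++ rest

-- ===== PORT B =====
def requirements_section_keys_py_alt (d : List (String × String)) (bl : List String) : List String :=
  let prio : PySem.Dict String Int :=
    (PySem.List.enumerate pvOrder).foldl (fun m p => PySem.Dict.insert m p.2 p.1) PySem.Dict.empty
  let sentinel : Int := (pvOrder.length : Int)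
  let keys := (PySem.List.dedup (d.map Prod.fst)).filter (fun k => !bl.contains k)
  PySem.List.sorted2 keys (fun k => PySem.Dict.getD prio k sentinel) (fun k => k)

-- ===== PRECONDITION & SPEC =====
def Spec_requirements_section_keys_py (d : List (String × String)) (bl : List String) (out : List String) : Prop := out = requirements_section_keys_py_alt d bl
instance (d : List (String × String)) (bl : List String) (out : List String) : Decidable (Spec_requirements_section_keys_py d bl out) := by unfold Spec_requirements_section_keys_py; infer_instance

-- ===== CLAIM (what is proved, stated in full; the proofs are below) =====
def Claim_equal_requirements_section_keys_py : Prop := ∀ (d : List (String × String)) (bl : List String), Dom_requirements_section_keys_py d bl → Spec_requirements_section_keys_py d bl (requirements_section_keys_py d bl)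

-- ===== LEMMAS AND PROOFS =====

-- the priority B's sort key assigns to a string (0,1,2 for the known sections, 3 = sentinel)
def pvF (k : String) : Int :=
  if k = "technical_skills" then 0 else if k = "core_competencies" then 1
  else if k = "attitude_mindset" then 2 else 3
def pvLt (a b : String) : Prop := pvF a < pvF b ∨ (pvF a = pvF b ∧ a < b)
def pvLe (a b : String) : Prop := pvF a < pvF b ∨ (pvF a = pvF b ∧ a ≤ b)

lemma pvF_eq : ∀ k, PySem.Dict.getD
    ((PySem.List.enumerate pvOrder).foldl (fun m p => PySem.Dict.insert m p.2 p.1) PySem.Dict.empty)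
    k ((pvOrder.length : Int)) = pvF k := by
  intro k
  by_cases h1 : k = "technical_skills" <;> by_cases h2 : k = "core_competencies" <;>
    by_cases h3 : k = "attitude_mindset" <;>
  · first
    | (have e1 : ("technical_skills" == k) = false := by simp [Ne.symm h1]
       have e2 : ("core_competencies" == k) = false := by simp [Ne.symm h2]
       have e3 : ("attitude_mindset" == k) = false := by simp [Ne.symm h3]
       simp [pvOrder, pvF, PySem.List.enumerate, PySem.Dict.getD, PySem.Dict.get?, PySem.Dict.insert,
        PySem.Dict.empty, List.find?, h1, h2, h3, e1, e2, e3])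
    | (simp [pvOrder, pvF, PySem.List.enumerate, PySem.Dict.getD, PySem.Dict.get?, PySem.Dict.insert,
        PySem.Dict.empty, List.find?, h1, h2, h3])

lemma pvLe_trans {a b c : String} (h1 : pvLe a b) (h2 : pvLe b c) : pvLe a c := by
  unfold pvLe at *
  rcases h1 with h | ⟨e1, l1⟩ <;> rcases h2 with h' | ⟨e2, l2⟩
  · exact Or.inl (h.trans h')
  · exact Or.inl (by omega)
  · exact Or.inl (by omega)
  · exact Or.inr ⟨by omega, l1.trans l2⟩

lemma pvLe_total_of_not_lt {a b : String} (h : ¬ pvLt a b) : pvLe b a := by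
  unfold pvLt at h; unfold pvLe
  rw [not_or, not_and_or] at h
  rcases lt_trichotomy (pvF a) (pvF b) with h' | h' | h'
  · exact absurd h' h.1
  · rcases h.2 with h2 | h2
    · omega
    · exact Or.inr ⟨h'.symm, not_lt.1 h2⟩
  · exact Or.inl h'

lemma pvLe_antisymm {a b : String} (h1 : pvLe a b) (h2 : pvLe b a) : a = b := by
  unfold pvLe at *
  rcases h1 with h | ⟨e1, l1⟩ <;> rcases h2 with h' | ⟨e2, l2⟩ <;> first
  | omega
  | exact le_antisymm l1 l2

def pvBef (a b : String) : Bool := decide (pvF a < pvF b) || (!decide (pvF b < pvF a) && decide (a < b))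
lemma pvBef_iff (a b : String) : pvBef a b = true ↔ pvLt a b := by
  unfold pvBef pvLt
  rcases lt_trichotomy (pvF a) (pvF b) with h | h | h <;>
    simp [h, not_lt_of_gt, ] <;> omega

lemma pv_insertBy_pairwise (x : String) (ys : List String) (h : ys.Pairwise pvLe) :
    (PySem.List.insertBy pvBef x ys).Pairwise pvLe := by
  induction ys with
  | nil => simp [PySem.List.insertBy]
  | cons y ys ih =>
    rw [List.pairwise_cons] at h
    by_cases hb : pvBef x y = true
    · have hxy : pvLt x y := (pvBef_iff x y).1 hb
      rw [PySem.List.insertBy, if_pos hb, List.pairwise_cons]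
      refine ⟨?_, List.pairwise_cons.2 h⟩
      intro z hz
      rcases List.mem_cons.1 hz with rfl | hz
      · exact Or.imp id (fun ⟨e, l⟩ => ⟨e, le_of_lt l⟩) hxy
      · exact pvLe_trans (Or.imp id (fun ⟨e, l⟩ => ⟨e, le_of_lt l⟩) hxy) (h.1 z hz)
    · have hyx : pvLe y x := pvLe_total_of_not_lt (fun hc => hb ((pvBef_iff x y).2 hc))
      rw [PySem.List.insertBy, if_neg hb, List.pairwise_cons]
      refine ⟨?_, ih h.2⟩
      intro z hz
      rcases (PySem.List.mem_insertBy pvBef x z ys).1 hz with rfl | hz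
      · exact hyx
      · exact h.1 z hz

lemma pv_foldl_pairwise (xs : List String) : ∀ (acc : List String), acc.Pairwise pvLe →
    (xs.foldl (fun acc x => PySem.List.insertBy pvBef x acc) acc).Pairwise pvLe := by
  induction xs with
  | nil => intro acc h; simpa using h
  | cons x xs ih =>
    intro acc h
    exact ih _ (pv_insertBy_pairwise x acc h)

lemma pv_sorted2_eq (xs ys : List String) (hp : ys.Perm xs) (hs : ys.Pairwise pvLt) :
    PySem.List.sorted2 xs pvF (fun k => k) = ys := by
  have hbef : (fun a b => decide (pvF a < pvF b) || (!decide (pvF b < pvF a) && decide ((fun k => k) a < (fun k => k) b))) = pvBef := by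
    funext a b; rfl
  have hres : PySem.List.sorted2 xs pvF (fun k => k) = xs.foldl (fun acc x => PySem.List.insertBy pvBef x acc) [] := by
    simp only [PySem.List.sorted2, hbef, if_neg (by decide : ¬ (false = true))]
  have hpw : (PySem.List.sorted2 xs pvF (fun k => k)).Pairwise pvLe := by
    rw [hres]; exact pv_foldl_pairwise xs [] (by simp)
  have hperm : (PySem.List.sorted2 xs pvF (fun k => k)).Perm ys := by
    exact (PySem.List.sorted2_perm xs pvF (fun k => k) false).trans hp.symm
  exact List.Perm.eq_of_pairwise (le := pvLe) (fun a b _ _ h1 h2 => pvLe_antisymm h1 h2) hpw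
    (hs.imp (fun h => Or.imp id (fun ⟨e, l⟩ => ⟨e, le_of_lt l⟩) h)) hperm

lemma pv_st_spec (bl ks : List String) : ∀ (ord l : List String) (s : PySem.Set String),
    (∀ k, k ∈ s ↔ k ∈ l) →
    (ord.foldl (fun (acc : List String × PySem.Set String) key =>
        if bl.contains key || !ks.contains key then acc
        else (acc.1 ++ [key], PySem.Set.add acc.2 key)) (l, s)).1
      = l ++ ord.filter (fun x => !(bl.contains x || !ks.contains x))
    ∧ ∀ k, k ∈ (ord.foldl (fun (acc : List String × PySem.Set String) key =>
        if bl.contains key || !ks.contains key then acc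
        else (acc.1 ++ [key], PySem.Set.add acc.2 key)) (l, s)).2
      ↔ k ∈ l ++ ord.filter (fun x => !(bl.contains x || !ks.contains x)) := by
  intro ord
  induction ord with
  | nil => intro l s hc; simpa using hc
  | cons x ord ih =>
    intro l s hc
    by_cases hx : (bl.contains x || !ks.contains x) = true
    · rw [List.foldl_cons, if_pos hx,
        List.filter_cons_of_neg (by intro hpa; change (!(bl.contains x || !ks.contains x)) = true at hpa; rw [hx] at hpa; cases hpa)]
      exact ih l s hc
    · have hc' : ∀ k, k ∈ PySem.Set.add s x ↔ k ∈ l ++ [x] := by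
        intro k
        rw [PySem.Set.mem_add]
        simp [hc k]
      have hxf : (bl.contains x || !ks.contains x) = false := by
        revert hx; cases (bl.contains x || !ks.contains x) <;> simp
      rw [List.foldl_cons, if_neg hx,
        List.filter_cons_of_pos (by rw [hxf]; rfl)]
      have := ih (l ++ [x]) (PySem.Set.add s x) hc'
      rw [this.1, List.append_assoc]
      refine ⟨rfl, ?_⟩
      intro k
      rw [this.2 k, List.append_assoc]
      rfl

lemma pvF_of_not_mem {k : String} (h : k ∉ pvOrder) : pvF k = 3 := by
  simp [pvOrder] at h
  simp [pvF, h.1, h.2.1, h.2.2]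

lemma pvF_lt_of_mem {k : String} (h : k ∈ pvOrder) : pvF k < 3 := by
  simp [pvOrder] at h
  rcases h with rfl | rfl | rfl <;> simp [pvF]

lemma pvOrder_pairwise : List.Pairwise pvLt pvOrder := by
  simp only [pvOrder, List.pairwise_cons, List.mem_cons]
  refine ⟨?_, ?_, ?_⟩
  · rintro a (rfl | rfl | h)
    · exact Or.inl (by decide)
    · exact Or.inl (by decide)
    · cases h
  · rintro a (rfl | h)
    · exact Or.inl (by decide)
    · cases h
  · simp

theorem main_eq (d : List (String × String)) (bl : List String) :
    requirements_section_keys_py d bl = requirements_section_keys_py_alt d bl := by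
  simp only [requirements_section_keys_py, requirements_section_keys_py_alt]
  set ks := PySem.List.dedup (List.map Prod.fst d) with hks
  have hksnd : ks.Nodup := PySem.List.nodup_dedup _
  have hst := pv_st_spec bl ks pvOrder [] PySem.Set.empty (by simp [PySem.Set.empty])
  set st := List.foldl (fun (acc : List String × PySem.Set String) key =>
      if (bl.contains key || !ks.contains key) = true then acc
      else (acc.1 ++ [key], PySem.Set.add acc.2 key)) ([], PySem.Set.empty) pvOrder with hstdef
  set known := pvOrder.filter (fun x => !(bl.contains x || !ks.contains x)) with hknown
  have h1 : st.1 = known := by simpa using hst.1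
  have h2 : ∀ k, k ∈ st.2 ↔ k ∈ known := by
    intro k; have := hst.2 k; simpa using this
  have mem_known : ∀ x, x ∈ known ↔ x ∈ pvOrder ∧ x ∉ bl ∧ x ∈ ks := by
    intro x; simp [hknown, List.mem_filter]
  set L := ks.filter (fun k => !bl.contains k) with hL
  set q : String → Bool := fun k => pvOrder.contains k with hq
  set restbase := ks.filter (fun k => !(PySem.Set.contains st.2 k) && !bl.contains k) with hrb
  have hkey : (fun k => PySem.Dict.getD
      ((PySem.List.enumerate pvOrder).foldl (fun m p => PySem.Dict.insert m p.2 p.1) PySem.Dict.empty)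
      k ((pvOrder.length : Int))) = pvF := funext pvF_eq
  rw [h1, hkey]
  have hrbL : restbase = L.filter (fun k => !q k) := by
    rw [hrb, hL, List.filter_filter]
    apply List.filter_congr
    intro k hk
    have hcont : PySem.Set.contains st.2 k = true ↔ (k ∈ pvOrder ∧ k ∉ bl ∧ k ∈ ks) := by
      rw [PySem.Set.contains, List.contains_eq_mem, decide_eq_true_eq, h2 k, mem_known]
    by_cases hbl : k ∈ bl <;> by_cases hord : k ∈ pvOrder <;>
        simp [hcont, hbl, hord, hq, hk] <;>
      first
      | exact (h2 k).2 ((mem_known k).2 ⟨hord, hbl, hk⟩)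
      | (intro hmem; exact absurd ((mem_known k).1 ((h2 k).1 hmem)) (by tauto))
  have hknownperm : known.Perm (L.filter q) := by
    apply List.perm_of_nodup_nodup_toFinset_eq
    · exact List.Nodup.filter _ (by decide)
    · exact List.Nodup.filter _ (List.Nodup.filter _ hksnd)
    · ext a
      simp only [List.mem_toFinset, mem_known, hL, List.mem_filter, hq,
        List.contains_eq_mem, decide_eq_true_eq, Bool.not_eq_true', decide_eq_false_iff_not]
      tauto
  have hp : (known ++ PySem.List.sorted restbase (fun x => x)).Perm L := by
    have p1 : (known ++ PySem.List.sorted restbase (fun x => x)).Perm (known ++ restbase) :=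
      List.Perm.append_left known (PySem.List.sorted_perm restbase (fun x => x) false)
    have p2 : (known ++ restbase).Perm (L.filter q ++ L.filter (fun k => !q k)) := by
      rw [hrbL]; exact List.Perm.append_right _ hknownperm
    exact (p1.trans p2).trans (List.filter_append_perm q L)
  have hf3 : ∀ kk ∈ PySem.List.sorted restbase (fun x => x), pvF kk = 3 := by
    intro kk hkk
    have hmem : kk ∈ restbase := ((PySem.List.sorted_perm restbase (fun x => x) false).mem_iff).1 hkk
    rw [hrbL] at hmem
    have hno : ¬ kk ∈ pvOrder := by
      have := (List.mem_filter.1 hmem).2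
      simpa [hq] using this
    exact pvF_of_not_mem hno
  have hs : (known ++ PySem.List.sorted restbase (fun x => x)).Pairwise pvLt := by
    rw [List.pairwise_append]
    refine ⟨?_, ?_, ?_⟩
    · exact List.Pairwise.sublist List.filter_sublist pvOrder_pairwise
    · have hnd : (PySem.List.sorted restbase (fun x => x)).Nodup :=
        ((PySem.List.sorted_perm restbase (fun x => x) false).nodup_iff).2
          (List.Nodup.filter _ hksnd)
      have hple := PySem.List.sorted_pairwise restbase (fun x => x)
      exact (hple.and hnd).imp_of_mem (fun {a b} ha hb h =>
        Or.inr ⟨by rw [hf3 a ha, hf3 b hb], lt_of_le_of_ne h.1 h.2⟩)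
    · intro a ha b hb
      exact Or.inl (by rw [hf3 b hb]; exact pvF_lt_of_mem ((mem_known a).1 ha).1)
  exact (pv_sorted2_eq L _ hp hs).symm

-- ===== VERDICT (by name: the statement is the Claim_ definition above) =====
theorem requirements_section_keys_py_spec : Claim_equal_requirements_section_keys_py := by
  intro d bl _
  unfold Spec_requirements_section_keys_py
  exact main_eq d bl
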